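-- pv_equiv track=rewrite | github.com/abev-crypto/LiberaDrone | liberadronecore/ledeffects/nodes/mask/le_idmask.py | _sorted_ids
-- ===== SOURCE A (Python) =====
-- def _sorted_ids(values) -> list[int]:
--     ids: list[int] = []
--     seen: set[int] = set()
--     for val in values:
--         try:
--             item = int(val)
--         except (TypeError, ValueError):
--             continue
--         if item in seen:
--             continue
--         seen.add(item)
--         ids.append(item)
--     ids.sort()
--     return ids
-- ===== SOURCE B (Python) =====
-- def _sorted_ids(values) -> list[int]:
--     items: list[int] = []
--     for val in values:
--         try:
--             items.append(int(val))
--         except (TypeError, ValueError):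
--             continue
--     items.sort()
--     out: list[int] = []
--     for x in items:
--         if not out or out[-1] != x:
--             out.append(x)
--     return out
-- ===== Notes on version B (the rewrite author's own statement) =====
-- stated objective: alternative
-- what changed: B drops the membership-set dedup during collection: it collects all parsed ints with duplicates, sorts, and removes adjacent duplicates in one linear pass over the sorted list.
import Mathlib
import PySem

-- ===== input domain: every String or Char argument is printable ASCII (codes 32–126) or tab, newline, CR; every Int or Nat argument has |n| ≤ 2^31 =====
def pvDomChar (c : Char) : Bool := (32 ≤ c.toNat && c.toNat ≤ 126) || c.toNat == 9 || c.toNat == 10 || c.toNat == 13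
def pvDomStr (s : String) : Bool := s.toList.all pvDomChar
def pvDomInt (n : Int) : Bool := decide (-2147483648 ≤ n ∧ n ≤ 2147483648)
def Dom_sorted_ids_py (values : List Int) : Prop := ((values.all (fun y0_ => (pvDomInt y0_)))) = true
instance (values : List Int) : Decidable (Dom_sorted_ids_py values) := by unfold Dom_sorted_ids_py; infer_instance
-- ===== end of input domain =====

-- B replaces A's dedup-with-a-seen-set-during-collection by sort-then-adjacent-dedup (alternative decomposition, same cost class).

-- ===== PORT A =====
-- for val in values: item = int(val) — the identity on Int, never raises, so the except branch is unreachable;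
-- skip if item in seen, else add to seen and append to ids; finally ids.sort().
def sorted_ids_py (values : List Int) : List Int :=
  PySem.List.sorted
    (values.foldl (fun (st : List Int × PySem.Set Int) val =>
        if PySem.Set.contains st.2 val then st
        else (st.1 ++ [val], PySem.Set.add st.2 val))
      ([], PySem.Set.empty)).1
    (fun x => x) false

-- ===== PORT B =====
-- items = all parsed ints (int(val) is the identity on Int, never raises, so every val is kept);
-- items.sort(); then the adjacent-dedup pass: append x unless out is nonempty and out[-1] == x.
def sorted_ids_py_alt (values : List Int) : List Int :=
  (PySem.List.sorted values (fun x => x) false).foldl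
    (fun (out : List Int) x => if out = [] ∨ out.getLast? ≠ some x then out ++ [x] else out) []

-- ===== PRECONDITION & SPEC =====
def Spec_sorted_ids_py (values : List Int) (out : List Int) : Prop := out = sorted_ids_py_alt values
instance (values : List Int) (out : List Int) : Decidable (Spec_sorted_ids_py values out) := by unfold Spec_sorted_ids_py; infer_instance

-- ===== CLAIM (what is proved, stated in full; the proofs are below) =====
def Claim_equal_sorted_ids_py : Prop := ∀ (values : List Int), Dom_sorted_ids_py values → Spec_sorted_ids_py values (sorted_ids_py values)

-- ===== LEMMAS AND PROOFS =====

-- A's fold keeps ids and seen equal (as lists): each step applies Set.add to both components.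
theorem pvA_fold_eq (l : List Int) (s : PySem.Set Int) :
    l.foldl (fun (st : List Int × PySem.Set Int) val =>
        if PySem.Set.contains st.2 val then st
        else (st.1 ++ [val], PySem.Set.add st.2 val)) (s, s)
    = (PySem.Set.update s l, PySem.Set.update s l) := by
  induction l generalizing s with
  | nil => simp [PySem.Set.update]
  | cons y t ih =>
    by_cases h : y ∈ s
    · have e1 : PySem.Set.add s y = s := by simp [PySem.Set.add, h]
      have e2 : PySem.Set.update s (y :: t) = PySem.Set.update s t := by
        simp [PySem.Set.update, e1]
      rw [List.foldl_cons, e2]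
      simpa [h] using ih s
    · have e1 : PySem.Set.add s y = s ++ [y] := by simp [PySem.Set.add, h]
      have e2 : PySem.Set.update s (y :: t) = PySem.Set.update (s ++ [y]) t := by
        simp [PySem.Set.update, e1]
      rw [List.foldl_cons, e2]
      simpa [h, e1] using ih (s ++ [y])

-- every element of a (·≤·)-pairwise list is ≤ its last element
theorem pvLe_getLast? (l : List Int) : l.Pairwise (· ≤ ·) →
    ∀ a ∈ l, ∃ z, l.getLast? = some z ∧ a ≤ z := by
  induction l with
  | nil => intro _ a ha; cases ha
  | cons y t ih =>
    intro hp a ha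
    cases t with
    | nil =>
      simp at ha
      exact ⟨y, by simp [ha]⟩
    | cons z t' =>
      have hp' := (List.pairwise_cons.mp hp)
      rcases List.mem_cons.mp ha with h | h
      · obtain ⟨w, hw, hle⟩ := ih hp'.2 z List.mem_cons_self
        exact ⟨w, by simpa [List.getLast?_cons_cons] using hw,
          h ▸ le_trans (hp'.1 z List.mem_cons_self) hle⟩
      · obtain ⟨w, hw, hle⟩ := ih hp'.2 a h
        exact ⟨w, by simpa [List.getLast?_cons_cons] using hw, hle⟩

-- the adjacent-dedup fold: invariant giving strict sortedness and membership
theorem pvDedup_inv (l : List Int) (acc : List Int)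
    (hacc : acc.Pairwise (· < ·)) (hl : l.Pairwise (· ≤ ·))
    (hsep : ∀ a ∈ acc, ∀ b ∈ l, a ≤ b) :
    (l.foldl (fun (out : List Int) x =>
        if out = [] ∨ out.getLast? ≠ some x then out ++ [x] else out) acc).Pairwise (· < ·) ∧
    (∀ x, x ∈ l.foldl (fun (out : List Int) x =>
        if out = [] ∨ out.getLast? ≠ some x then out ++ [x] else out) acc ↔ x ∈ acc ∨ x ∈ l) := by
  induction l generalizing acc with
  | nil => exact ⟨hacc, by simp⟩
  | cons y t ih =>
    have hp := List.pairwise_cons.mp hl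
    simp only [List.foldl_cons]
    by_cases h : acc = [] ∨ acc.getLast? ≠ some y
    · rw [if_pos h]
      have hlt : ∀ a ∈ acc, a < y := by
        intro a ha
        have hle : a ≤ y := hsep a ha y List.mem_cons_self
        rcases lt_or_eq_of_le hle with h' | h'
        · exact h'
        · exfalso
          obtain ⟨z, hz, hlez⟩ := pvLe_getLast? acc (hacc.imp le_of_lt) a ha
          have hzy : z ≤ y := hsep z (List.mem_of_getLast? hz) y List.mem_cons_self
          have hzeq : z = y := le_antisymm hzy (h' ▸ hlez)
          rcases h with h | h
          · simp [h] at hz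
          · exact h (hzeq ▸ hz)
      have hacc' : (acc ++ [y]).Pairwise (· < ·) := by
        rw [List.pairwise_append]
        exact ⟨hacc, by simp, by simpa using hlt⟩
      have hsep' : ∀ a ∈ acc ++ [y], ∀ b ∈ t, a ≤ b := by
        intro a ha b hb
        rcases List.mem_append.mp ha with h' | h'
        · exact hsep a h' b (List.mem_cons_of_mem _ hb)
        · simp at h'; exact h' ▸ hp.1 b hb
      obtain ⟨h1, h2⟩ := ih (acc ++ [y]) hacc' hp.2 hsep'
      refine ⟨h1, fun x => ?_⟩
      rw [h2 x]
      simp [or_assoc, or_comm, or_left_comm]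
    · rw [if_neg h]
      push Not at h
      have hy : y ∈ acc := List.mem_of_getLast? h.2
      obtain ⟨h1, h2⟩ := ih acc hacc hp.2 (fun a ha b hb => hsep a ha b (List.mem_cons_of_mem _ hb))
      refine ⟨h1, fun x => ?_⟩
      rw [h2 x]
      constructor
      · rintro (hx | hx)
        · exact Or.inl hx
        · exact Or.inr (List.mem_cons_of_mem _ hx)
      · rintro (hx | hx)
        · exact Or.inl hx
        · rcases List.mem_cons.mp hx with rfl | hx
          · exact Or.inl hy
          · exact Or.inr hx

-- ===== VERDICT (by name: the statement is the Claim_ definition above) =====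
theorem sorted_ids_py_spec : Claim_equal_sorted_ids_py := by
  intro values _
  unfold Spec_sorted_ids_py sorted_ids_py sorted_ids_py_alt
  have h0 : (([], PySem.Set.empty) : List Int × PySem.Set Int) = (([] : List Int), ([] : List Int)) := rfl
  rw [h0, pvA_fold_eq values []]
  have hids' : PySem.Set.update ([] : PySem.Set Int) values = PySem.Set.ofList values := by
    simp [PySem.Set.update, PySem.Set.ofList_eq_foldl]
  have hsorted : (PySem.List.sorted values (fun x => x) false).Pairwise (· ≤ ·) := by
    simpa using PySem.List.sorted_pairwise values (fun x => x)
  obtain ⟨hpw, hmem⟩ := pvDedup_inv (PySem.List.sorted values (fun x => x) false) []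
    (by simp) hsorted (by simp)
  have hperm : ((PySem.List.sorted values (fun x => x) false).foldl
      (fun (out : List Int) x => if out = [] ∨ out.getLast? ≠ some x then out ++ [x] else out)
      []).Perm (PySem.Set.ofList values) := by
    rw [List.perm_ext_iff_of_nodup (hpw.imp ne_of_lt) (PySem.Set.nodup_ofList values)]
    intro a
    rw [hmem a, PySem.Set.mem_ofList]
    simp [PySem.List.mem_sorted]
  simp only [hids']
  exact PySem.List.sorted_eq_of_perm_of_pairwise_lt (PySem.Set.ofList values) _ (fun x => x)
    hperm hpw
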